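-- pv_equiv track=rewrite | github.com/Muitoinsano/python | app/http_metrics/instrumented_request.py | mask_data
-- ===== SOURCE A (Python) =====
-- def mask_data(data, mask_fields):
--     """
--     Mascarar campos sensíveis de um dicionário.
--     """
--     if not data or not mask_fields:
--         return data
--
--     masked_data = data.copy()
--     for field in mask_fields:
--         if field in masked_data:
--             masked_data[field] = "*****"  # Substitui o valor por asteriscos
--     return masked_data
-- ===== SOURCE B (Python) =====
-- def mask_data(data, mask_fields):
--     """
--     Mascarar campos sensíveis de um dicionário.
--     """
--     if not data or not mask_fields:
--         return data
--     fields = set(mask_fields)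
--     return {k: ("*****" if k in fields else v) for k, v in data.items()}
-- ===== Notes on version B (the rewrite author's own statement) =====
-- stated objective: idiomatic
-- what changed: Instead of copying the dict and looping over mask_fields probing and mutating the copy, B builds the result in one dict comprehension over data.items(), testing each key against a set of mask fields.
import Mathlib
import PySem

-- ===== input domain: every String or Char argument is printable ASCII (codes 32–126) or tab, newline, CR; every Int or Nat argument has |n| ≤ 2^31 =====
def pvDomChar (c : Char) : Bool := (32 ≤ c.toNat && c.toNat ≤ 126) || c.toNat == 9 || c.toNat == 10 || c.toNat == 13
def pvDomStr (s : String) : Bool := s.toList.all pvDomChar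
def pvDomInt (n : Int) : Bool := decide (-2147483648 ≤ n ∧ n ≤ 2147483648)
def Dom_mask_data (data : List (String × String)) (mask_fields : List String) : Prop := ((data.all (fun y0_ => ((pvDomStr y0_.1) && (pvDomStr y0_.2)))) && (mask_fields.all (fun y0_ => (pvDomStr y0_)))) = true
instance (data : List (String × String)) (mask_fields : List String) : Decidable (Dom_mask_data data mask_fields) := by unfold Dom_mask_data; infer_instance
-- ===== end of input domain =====

-- B replaces A's copy-then-mutate loop over mask_fields by a single dict comprehension over
-- data.items() with a membership test per key (idiomatic; iterates the other collection).

-- ===== PORT A =====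
-- loops over mask_fields, overwriting the value in a copy of data when the field is present
def mask_data (data : List (String × String)) (mask_fields : List String) : List (String × String) :=
  if data.isEmpty || mask_fields.isEmpty then data
  else
    let masked := mask_fields.foldl
      (fun (d : PySem.Dict String String) field =>
        if d.contains field then d.insert field "*****" else d)
      (PySem.Dict.ofList data)
    masked.items

-- ===== PORT B =====
-- one comprehension over data.items(), masking each key that is in the set of mask fields
def mask_data_alt (data : List (String × String)) (mask_fields : List String) : List (String × String) :=
  if data.isEmpty || mask_fields.isEmpty then data
  else
    let fields := PySem.Set.ofList mask_fields
    (PySem.Dict.ofList data).items.map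
      (fun kv => (kv.1, if fields.contains kv.1 then "*****" else kv.2))

-- ===== PRECONDITION & SPEC =====
def Spec_mask_data (data : List (String × String)) (mask_fields : List String) (out : List (String × String)) : Prop := out = mask_data_alt data mask_fields
instance (data : List (String × String)) (mask_fields : List String) (out : List (String × String)) : Decidable (Spec_mask_data data mask_fields out) := by unfold Spec_mask_data; infer_instance

-- ===== CLAIM (what is proved, stated in full; the proofs are below) =====
def Claim_equal_mask_data : Prop := ∀ (data : List (String × String)) (mask_fields : List String), Dom_mask_data data mask_fields → Spec_mask_data data mask_fields (mask_data data mask_fields)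

-- ===== LEMMAS AND PROOFS =====

-- set membership agrees with list membership
theorem contains_ofList (l : List String) (x : String) :
    (PySem.Set.ofList l).contains x = l.contains x := by
  by_cases h : x ∈ l <;>
    simp [PySem.Set.mem_ofList, h]

-- the loop invariant: masking fields one by one equals mapping the membership mask over items
theorem mask_loop_items (fields : List String) (d : PySem.Dict String String) :
    (fields.foldl
      (fun (d : PySem.Dict String String) field =>
        if d.contains field then d.insert field "*****" else d) d).items
    = d.items.map (fun kv => (kv.1, if fields.contains kv.1 then "*****" else kv.2)) := by
  induction fields generalizing d with
  | nil => simp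
  | cons f fs ih =>
    simp only [List.foldl_cons, ih]
    by_cases h : d.contains f = true
    · simp only [h, if_true]
      rw [PySem.Dict.items_insert_of_contains _ _ h, List.map_map]
      apply List.map_congr_left
      intro kv _
      by_cases hk : kv.1 = f
      · simp [hk]
      · simp [Function.comp, hk, beq_iff_eq]
    · replace h : d.contains f = false := by simpa using h
      simp only [h, Bool.false_eq_true, if_false]
      apply List.map_congr_left
      intro kv hkv
      have hne : kv.1 ≠ f := by
        intro he
        have hc : d.contains kv.1 = true := by
          rw [PySem.Dict.contains_iff_mem_keys]
          exact PySem.Dict.mem_keys_of_mem_items d hkv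
        rw [he, h] at hc
        exact Bool.false_ne_true hc
      simp [hne]

-- ===== VERDICT (by name: the statement is the Claim_ definition above) =====
theorem mask_data_spec : Claim_equal_mask_data := by
  intro data mask_fields _
  unfold Spec_mask_data mask_data mask_data_alt
  by_cases h : (data.isEmpty || mask_fields.isEmpty) = true
  · simp [h]
  · rw [if_neg h, if_neg h]
    rw [mask_loop_items mask_fields (PySem.Dict.ofList data)]
    apply List.map_congr_left
    intro kv _
    rw [contains_ofList]
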